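-- pv_equiv track=rewrite | github.com/dong99u/swea_algorithm | lectures/05_stack_queue/100_offline/1220_magnetic/student.py | countMaterials
-- ===== SOURCE A (Python) =====
-- from collections import deque
--
-- def countMaterials(ar):
--     # 순차적으로 탐색하면서 자성체를 구합니다.
--     cur_materials = []
--
--     # 1. '1'다음으로 '2'가 나와야 하나의 자성체를 구성할 수 있습니다.
--     # 2. 이때, '12212' 와 같이 연속으로 나와서 하나의 자성체를 구성하는 경우가 있습니다. 이는 idx를 추적하면 될거 같습니다.
--     stack = deque()
--     for idx in range(len(ar)):
--         if ar[idx] == '1':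
--             # N극은 아래로 향합니다. '2'를 만나기 전까지 스택에 넣어집니다. idx도 기록해서 최종 위치를 추적해서 변형시킬 준비합니다.
--             stack.append([1, idx])
--         if ar[idx] == '2':
--             # '1'이 나온적 없으면 넘어갑니다.
--             if len(stack) == 0 and len(cur_materials) == 0:
--                 continue
--
--             # 기다리고 있는 '1'은 안나왔지만 자성체를 만든적이 있다면 바로 위에 붙입니다.
--             elif len(stack) == 0 and len(cur_materials) >= 1:
--                 cur_materials[-1][1] += 1
--
--             # 현재 대기중인 모든 '1'이 있다면 자성체를 만듭니다.
--             elif len(stack) >= 1: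
--                 _, last_1_idx = stack.pop()
--                 # 최종 위치 추적
--                 # 2----7 -> --45--
--                 move_idx = (idx - last_1_idx + 1) // 2  # 4
--
--                 last_1_idx = last_1_idx + move_idx
--                 last_2_idx = idx - move_idx
--                 if len(cur_materials) >= 1:
--                     # 최종적으로 만든 자성체의 '1'이 이전에 만든 자성체의 '2'와 붙어있다면? 통합시킵니다.
--                     if cur_materials[-1][1] - last_1_idx == 1:
--                         cur_materials[-1][1] = last_2_idx
--                     else:
--                         # 아니면 자성체 하나 만들었다고 추가시킵니다.
--                         cur_materials.append([last_1_idx, last_2_idx])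
--                 else:
--                     # 이전에 만든 자성체가 없으면 그냥
--                     cur_materials.append([last_1_idx, last_2_idx])
--
--                 # 지금까지 나온적 있는 '1'들도 방금 만들어진 최종 자성체에 붙입니다.
--                 cur_materials[-1][0] += len(stack)
--                 stack = deque()
--
--     return len(cur_materials)
-- ===== SOURCE B (Python) =====
-- def countMaterials(ar):
--     count = 0
--     pending = False
--     for x in ar:
--         if x == '1':
--             pending = True
--         elif x == '2' and pending:
--             count += 1
--             pending = False
--     return count
-- ===== Notes on version B (the rewrite author's own statement) =====
-- stated objective: simpler
-- what changed: Replaced the deque of [value,index] records, the move_idx centering arithmetic and the (unreachable) merge/accumulate bookkeeping with a single-pass state machine holding only an integer count and a 'pending 1' flag.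
import Mathlib
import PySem

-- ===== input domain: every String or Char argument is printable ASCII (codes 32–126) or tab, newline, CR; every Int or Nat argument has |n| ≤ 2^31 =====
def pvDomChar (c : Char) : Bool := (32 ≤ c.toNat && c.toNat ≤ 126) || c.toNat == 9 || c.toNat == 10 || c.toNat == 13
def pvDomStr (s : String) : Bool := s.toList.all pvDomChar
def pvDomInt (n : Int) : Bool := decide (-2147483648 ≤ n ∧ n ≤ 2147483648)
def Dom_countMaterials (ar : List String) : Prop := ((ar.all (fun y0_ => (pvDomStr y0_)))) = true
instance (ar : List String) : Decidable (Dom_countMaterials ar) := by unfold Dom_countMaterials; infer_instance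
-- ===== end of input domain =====

-- B replaces A's deque of [value,index] records and its index-centering/merge bookkeeping
-- (the merge branch is proved unreachable) by a count + pending-flag state machine: simpler, O(1) space.

-- ===== PORT A =====
-- modify the last element of a list in place (Python's cur_materials[-1][...] = ...)
def pvModLast (f : Int × Int → Int × Int) : List (Int × Int) → List (Int × Int)
  | [] => []
  | [p] => [f p]
  | p :: q :: ps => p :: pvModLast f (q :: ps)

-- the 'for idx in range(len(ar))' loop of A; walking the list with idx counting is exactly ar[idx]
def pvALoop : List String → Int → List (Int × Int) → List (Int × Int) → List (Int × Int)
  | [], _, cur, _ => cur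
  | x :: rest, idx, cur, stack0 =>
    -- if ar[idx] == '1': stack.append([1, idx])
    let stack := if x = "1" then stack0 ++ [((1 : Int), idx)] else stack0
    -- if ar[idx] == '2':
    if x = "2" then
      if stack = [] ∧ cur = [] then
        pvALoop rest (idx + 1) cur stack
      else if stack = [] ∧ cur ≠ [] then
        pvALoop rest (idx + 1) (pvModLast (fun p => (p.1, p.2 + 1)) cur) stack
      else
        match stack.getLast? with
        | none => pvALoop rest (idx + 1) cur stack  -- unreachable: guarded by stack ≠ []
        | some (_, last1) =>
          let stack' := stack.dropLast
          let move := PySem.Int.floordiv (idx - last1 + 1) 2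
          let l1 := last1 + move
          let l2 := idx - move
          let cur' :=
            if cur ≠ [] then
              if (cur.getLast?.map Prod.snd).getD 0 - l1 = 1 then
                pvModLast (fun p => (p.1, l2)) cur
              else cur ++ [(l1, l2)]
            else cur ++ [(l1, l2)]
          pvALoop rest (idx + 1) (pvModLast (fun p => (p.1 + (stack'.length : Int), p.2)) cur') []
    else
      pvALoop rest (idx + 1) cur stack

def countMaterials (ar : List String) : Int := ((pvALoop ar 0 [] []).length : Int)

-- ===== PORT B =====
def pvBLoop : List String → Bool → Int → Int
  | [], _, count => count
  | x :: rest, pending, count =>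
    if x = "1" then pvBLoop rest true count
    else if x = "2" && pending then pvBLoop rest false (count + 1)
    else pvBLoop rest pending count

def countMaterials_alt (ar : List String) : Int := pvBLoop ar false 0

-- ===== PRECONDITION & SPEC =====
def Spec_countMaterials (ar : List String) (out : Int) : Prop := out = countMaterials_alt ar
instance (ar : List String) (out : Int) : Decidable (Spec_countMaterials ar out) := by unfold Spec_countMaterials; infer_instance

-- ===== CLAIM (what is proved, stated in full; the proofs are below) =====
def Claim_equal_countMaterials : Prop := ∀ (ar : List String), Dom_countMaterials ar → Spec_countMaterials ar (countMaterials ar)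

-- ===== LEMMAS AND PROOFS =====

theorem pvModLast_length (f : Int × Int → Int × Int) (l : List (Int × Int)) :
    (pvModLast f l).length = l.length := by
  induction l with
  | nil => rfl
  | cons p ps ih =>
    cases ps with
    | nil => rfl
    | cons q qs => simpa [pvModLast] using ih

theorem pvModLast_getLast? (f : Int × Int → Int × Int) (l : List (Int × Int)) :
    (pvModLast f l).getLast? = l.getLast?.map f := by
  induction l with
  | nil => rfl
  | cons p ps ih =>
    cases ps with
    | nil => rfl
    | cons q qs =>
      cases h : pvModLast f (q :: qs) with
      | nil =>
        have := pvModLast_length f (q :: qs)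
        rw [h] at this; simp at this
      | cons r rs =>
        rw [pvModLast, h, List.getLast?_cons_cons, ← h, ih, List.getLast?_cons_cons]

-- main invariant lemma: A's loop length equals B's count, given that
-- every stacked '1' index is below idx and above the last material's right end.
theorem pvLoop_agree (xs : List String) :
    ∀ (idx : Int) (cur stack : List (Int × Int)) (c : Int),
      (∀ p ∈ stack, p.2 < idx ∧ ∀ q, cur.getLast? = some q → q.2 < p.2) →
      (∀ q, cur.getLast? = some q → q.2 < idx) →
      c = (cur.length : Int) →
      ((pvALoop xs idx cur stack).length : Int) = pvBLoop xs (!stack.isEmpty) c := by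
  induction xs with
  | nil => intro idx cur stack c _ _ hc; simp [pvALoop, pvBLoop, hc]
  | cons x rest ih =>
    intro idx cur stack c hstk hcur hc
    by_cases h1 : x = "1"
    · -- push (1, idx); pending becomes true
      subst h1
      have hB : pvBLoop ("1" :: rest) (!stack.isEmpty) c = pvBLoop rest true c := by
        simp [pvBLoop]
      rw [hB]
      have hA : pvALoop ("1" :: rest) idx cur stack
          = pvALoop rest (idx + 1) cur (stack ++ [((1:Int), idx)]) := by
        simp [pvALoop]
      rw [hA]
      have hT : true = (!(stack ++ [((1:Int), idx)]).isEmpty) := by simp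
      rw [hT]
      apply ih (idx + 1) cur (stack ++ [(1, idx)]) c
      · intro p hp
        rcases List.mem_append.1 hp with hp | hp
        · exact ⟨by linarith [(hstk p hp).1], (hstk p hp).2⟩
        · simp only [List.mem_singleton] at hp
          subst hp
          exact ⟨by linarith, fun q hq => hcur q hq⟩
      · intro q hq; linarith [hcur q hq]
      · exact hc
    · by_cases h2 : x = "2"
      · subst h2
        simp only [pvALoop, if_neg h1, if_true]
        by_cases hs : stack = []
        · -- pending false: B ignores; A skips or bumps last right end
          subst hs
          have hB : pvBLoop ("2" :: rest) (!([] : List (Int × Int)).isEmpty) c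
              = pvBLoop rest false c := by
            simp [pvBLoop, h1]
          rw [hB]
          by_cases hcs : cur = []
          · rw [if_pos ⟨rfl, hcs⟩]
            exact ih (idx + 1) cur [] c (by simp) (fun q hq => by linarith [hcur q hq]) hc
          · rw [if_neg (by simp [hcs]), if_pos ⟨rfl, hcs⟩]
            apply ih (idx + 1) _ [] c (by simp)
            · intro q hq
              rw [pvModLast_getLast?] at hq
              rcases Option.map_eq_some_iff.1 hq with ⟨q0, hq0, hqeq⟩
              have := hcur q0 hq0
              subst hqeq
              simp only
              linarith
            · rw [hc]; exact_mod_cast (pvModLast_length _ cur).symm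
        · -- pending true: A builds one material (merge branch shown unreachable), B counts 1
          rw [if_neg (by simp [hs]), if_neg (by simp [hs])]
          obtain ⟨l, p, hlp⟩ : ∃ (l : List (Int × Int)) (p : Int × Int), stack = l ++ [p] :=
            ⟨stack.dropLast, stack.getLast hs, (List.dropLast_concat_getLast hs).symm⟩
          obtain ⟨v, s⟩ := p
          have hget : stack.getLast? = some (v, s) := by
            rw [hlp]; simp
          rw [hget]
          simp only []
          have hsin : (v, s) ∈ stack := by rw [hlp]; simp
          have hsidx : s < idx := (hstk _ hsin).1
          have hdrop : stack.dropLast = l := by rw [hlp]; simp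
          have hmove : 1 ≤ PySem.Int.floordiv (idx - s + 1) 2 := by
            rw [PySem.Int.le_floordiv_iff_mul_le (by norm_num)]
            linarith
          have hB : pvBLoop ("2" :: rest) (!stack.isEmpty) c
              = pvBLoop rest false (c + 1) := by
            simp [pvBLoop, h1, hs]
          rw [hB]
          set move := PySem.Int.floordiv (idx - s + 1) 2 with hmv
          have hmerge : ∀ hcs : cur ≠ [],
              ((cur.getLast?.map Prod.snd).getD 0 - (s + move) = 1) → False := by
            intro hcs hmc
            obtain ⟨q, hqlast⟩ : ∃ q, cur.getLast? = some q :=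
              ⟨cur.getLast hcs, List.getLast?_eq_some_getLast hcs⟩
            have := (hstk _ hsin).2 q hqlast
            rw [hqlast] at hmc
            simp only [Option.map_some, Option.getD_some] at hmc
            linarith
          have hcur' :
              (if cur ≠ [] then
                if (cur.getLast?.map Prod.snd).getD 0 - (s + move) = 1 then
                  pvModLast (fun p => (p.1, idx - move)) cur
                else cur ++ [(s + move, idx - move)]
              else cur ++ [(s + move, idx - move)]) = cur ++ [(s + move, idx - move)] := by
            by_cases hcs : cur = []
            · simp [hcs]
            · rw [if_pos hcs, if_neg (fun h => hmerge hcs h)]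
          rw [hcur']
          apply ih (idx + 1) _ [] (c + 1) (by simp)
          · intro q hq
            rw [pvModLast_getLast?] at hq
            have hlast : (cur ++ [(s + move, idx - move)]).getLast? = some (s + move, idx - move) := by
              simp
            rw [hlast] at hq
            simp only [Option.map_some, Option.some.injEq] at hq
            subst hq
            simp only
            linarith
          · rw [hc]
            rw [pvModLast_length]
            simp
      · -- neither '1' nor '2': both loops skip
        simp only [pvALoop, if_neg h1, if_neg h2]
        have hB : pvBLoop (x :: rest) (!stack.isEmpty) c
            = pvBLoop rest (!stack.isEmpty) c := by
          simp [pvBLoop, h1, h2]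
        rw [hB]
        exact ih (idx + 1) cur stack c
          (fun p hp => ⟨by linarith [(hstk p hp).1], (hstk p hp).2⟩)
          (fun q hq => by linarith [hcur q hq]) hc

-- ===== VERDICT (by name: the statement is the Claim_ definition above) =====
theorem countMaterials_spec : Claim_equal_countMaterials := by
  intro ar _
  unfold Spec_countMaterials countMaterials countMaterials_alt
  exact pvLoop_agree ar 0 [] [] 0 (by simp) (by simp) (by simp)
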